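-- pv_equiv track=rewrite | github.com/janael-pinheiro/hacker_hank_solutions | hacker_hank/funny_string.py | is_funny_string
-- ===== SOURCE A (Python) =====
-- def is_funny_string(input_string: str) -> str:
--     current_forward = 0
--     end = len(input_string) - 1
--     current_backward = end
--
--     for _ in range(end - 1):
--         absolute_difference_forward = abs(ord(input_string[current_forward]) - ord((input_string[current_forward+1])))
--         absolute_difference_backward = abs(ord(input_string[current_backward]) - ord(input_string[current_backward-1]))
--         if absolute_difference_forward != absolute_difference_backward:
--             return "Not Funny"
--         current_forward += 1
--         current_backward -= 1
--     return "Funny"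
-- ===== SOURCE B (Python) =====
-- def is_funny_string(input_string: str) -> str:
--     diffs = [abs(ord(input_string[i]) - ord(input_string[i + 1]))
--              for i in range(len(input_string) - 1)]
--     return "Funny" if diffs == diffs[::-1] else "Not Funny"
-- ===== Notes on version B (the rewrite author's own statement) =====
-- stated objective: simpler
-- what changed: A interleaves a forward and a backward index in one early-exit loop comparing the two adjacent differences step by step; B materializes the whole list of absolute adjacent differences once via a comprehension and returns Funny iff that list equals its reversal.
import Mathlib
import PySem

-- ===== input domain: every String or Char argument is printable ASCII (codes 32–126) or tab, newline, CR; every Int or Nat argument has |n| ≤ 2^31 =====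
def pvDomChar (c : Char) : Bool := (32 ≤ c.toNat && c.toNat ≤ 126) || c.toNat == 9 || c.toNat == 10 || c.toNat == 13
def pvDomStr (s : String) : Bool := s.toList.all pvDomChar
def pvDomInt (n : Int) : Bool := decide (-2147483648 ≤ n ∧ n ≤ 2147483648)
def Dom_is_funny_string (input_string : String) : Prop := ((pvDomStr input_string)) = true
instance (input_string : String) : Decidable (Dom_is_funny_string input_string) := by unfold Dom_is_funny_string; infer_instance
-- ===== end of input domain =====

-- B replaces A's interleaved forward/backward two-index early-exit loop by building the
-- list of absolute adjacent differences once and checking it equals its reversal (simpler).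

-- ===== PORT A =====
-- the loop 'for _ in range(end-1)' with state (current_forward, current_backward);
-- the 'none' branches correspond to a Python IndexError, which the loop's indices never hit
def pvLoopA (cs : List Char) : Nat → Int → Int → String
  | 0, _, _ => "Funny"
  | Nat.succ k, cf, cb =>
    match PySem.List.pyGet? cs cf, PySem.List.pyGet? cs (cf + 1),
          PySem.List.pyGet? cs cb, PySem.List.pyGet? cs (cb - 1) with
    | some a, some b, some c, some d =>
        if |(a.toNat : Int) - (b.toNat : Int)| ≠ |(c.toNat : Int) - (d.toNat : Int)| then
          "Not Funny"
        else pvLoopA cs k (cf + 1) (cb - 1)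
    | _, _, _, _ => "Not Funny"

def is_funny_string (input_string : String) : String :=
  let cs := input_string.toList
  let e : Int := (cs.length : Int) - 1
  pvLoopA cs (e - 1).toNat 0 e

-- ===== PORT B =====
-- abs(ord(s[i]) - ord(s[i+1])); both indices are in range for every i in range(len(s)-1),
-- so getD is exact there
def pvDiffAt (cs : List Char) (i : Nat) : Int :=
  |((cs.getD i default).toNat : Int) - ((cs.getD (i + 1) default).toNat : Int)|

def is_funny_string_alt (input_string : String) : String :=
  let cs := input_string.toList
  let diffs := (List.range (cs.length - 1)).map (pvDiffAt cs)
  if diffs = diffs.reverse then "Funny" else "Not Funny"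

-- ===== PRECONDITION & SPEC =====
def Spec_is_funny_string (input_string : String) (out : String) : Prop := out = is_funny_string_alt input_string
instance (input_string : String) (out : String) : Decidable (Spec_is_funny_string input_string out) := by unfold Spec_is_funny_string; infer_instance

-- ===== CLAIM (what is proved, stated in full; the proofs are below) =====
def Claim_equal_is_funny_string : Prop := ∀ (input_string : String), Dom_is_funny_string input_string → Spec_is_funny_string input_string (is_funny_string input_string)

-- ===== LEMMAS AND PROOFS =====

lemma pvGet_some (cs : List Char) (i : Nat) (h : i < cs.length) :
    PySem.List.pyGet? cs (i : Int) = some (cs.getD i default) := by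
  rw [PySem.List.pyGet?_natCast, List.getElem?_eq_getElem h, List.getD_eq_getElem _ _ h]

-- invariant of A's loop: with cb = n-1-cf, k iterations check diffs cf..cf+k-1 against their mirrors
lemma pvLoopA_eq (cs : List Char) (k cf : Nat) (h : cf + k + 2 ≤ cs.length) :
    pvLoopA cs k (cf : Int) ((cs.length : Int) - 1 - cf) =
      if ∀ j < k, pvDiffAt cs (cf + j) = pvDiffAt cs (cs.length - 2 - (cf + j)) then "Funny"
      else "Not Funny" := by
  induction k generalizing cf with
  | zero => simp [pvLoopA]
  | succ k ih =>
    have h1 : ((cs.length : Int) - 1 - cf) - 1 = ((cs.length - 2 - cf : Nat) : Int) := by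
      omega
    have hn : ((cs.length : Int) - 1 - cf) = ((cs.length - 1 - cf : Nat) : Int) := by
      omega
    have hcf1 : ((cf : Int) + 1) = ((cf + 1 : Nat) : Int) := by push_cast; ring
    rw [pvLoopA, hcf1, h1, hn,
      pvGet_some cs cf (by omega), pvGet_some cs (cf + 1) (by omega),
      pvGet_some cs (cs.length - 1 - cf) (by omega),
      pvGet_some cs (cs.length - 2 - cf) (by omega)]
    have hback : cs.length - 2 - cf + 1 = cs.length - 1 - cf := by omega
    by_cases hne : pvDiffAt cs cf = pvDiffAt cs (cs.length - 2 - cf)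
    · have hcond : ¬ (|((cs.getD cf default).toNat : Int) - ((cs.getD (cf + 1) default).toNat : Int)| ≠
          |((cs.getD (cs.length - 1 - cf) default).toNat : Int) -
            ((cs.getD (cs.length - 2 - cf) default).toNat : Int)|) := by
        simpa [pvDiffAt, hback, abs_sub_comm] using hne
      dsimp only
      rw [if_neg hcond]
      have h2 : ((cs.length - 2 - cf : Nat) : Int) = (cs.length : Int) - 1 - ((cf + 1 : Nat) : Int) := by
        push_cast; omega
      rw [h2, ih (cf + 1) (by omega)]
      by_cases hall : ∀ j < k, pvDiffAt cs (cf + 1 + j) = pvDiffAt cs (cs.length - 2 - (cf + 1 + j))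
      · rw [if_pos hall, if_pos]
        intro j hj
        cases j with
        | zero => simpa using hne
        | succ j =>
          have := hall j (by omega)
          have e1 : cf + (j + 1) = cf + 1 + j := by omega
          rw [e1]; exact this
      · rw [if_neg hall, if_neg]
        intro hall'
        exact hall fun j hj => by
          have := hall' (j + 1) (by omega)
          have e1 : cf + (j + 1) = cf + 1 + j := by omega
          rwa [e1] at this
    · have hcond : (|((cs.getD cf default).toNat : Int) - ((cs.getD (cf + 1) default).toNat : Int)| ≠
          |((cs.getD (cs.length - 1 - cf) default).toNat : Int) -
            ((cs.getD (cs.length - 2 - cf) default).toNat : Int)|) := by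
        simpa [pvDiffAt, hback, abs_sub_comm] using hne
      dsimp only
      rw [if_pos hcond, if_neg]
      intro hall
      exact hne (by simpa using hall 0 (by omega))

lemma pvPalindrome_iff (cs : List Char) :
    ((List.range (cs.length - 1)).map (pvDiffAt cs) =
      ((List.range (cs.length - 1)).map (pvDiffAt cs)).reverse) ↔
    ∀ i < cs.length - 1, pvDiffAt cs i = pvDiffAt cs (cs.length - 2 - i) := by
  set n := cs.length - 1 with hn
  constructor
  · intro hpal i hi
    have h := congrArg (fun l => l[i]?) hpal
    simp only at h
    rw [List.getElem?_reverse (by simp [hi])] at h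
    simp only [List.length_map, List.length_range] at h
    rw [List.getElem?_map, List.getElem?_map, List.getElem?_range hi,
      List.getElem?_range (by omega : n - 1 - i < n)] at h
    simp only [Option.map_some, Option.some.injEq] at h
    have e1 : n - 1 - i = cs.length - 2 - i := by omega
    rwa [e1] at h
  · intro hall
    apply List.ext_getElem?
    intro i
    by_cases hi : i < n
    · rw [List.getElem?_reverse (by simp [hi]), List.length_map, List.length_range,
        List.getElem?_map, List.getElem?_map, List.getElem?_range hi,
        List.getElem?_range (by omega : n - 1 - i < n)]
      have e1 : n - 1 - i = cs.length - 2 - i := by omega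
      simp [e1, hall i hi]
    · rw [List.getElem?_eq_none (by simp; omega),
        List.getElem?_eq_none (by simp; omega)]

lemma pvMain (cs : List Char) :
    pvLoopA cs ((((cs.length : Int) - 1) - 1).toNat) 0 ((cs.length : Int) - 1) =
      if (List.range (cs.length - 1)).map (pvDiffAt cs) =
          ((List.range (cs.length - 1)).map (pvDiffAt cs)).reverse then "Funny"
      else "Not Funny" := by
  by_cases hlen : cs.length ≤ 1
  · have hf : (((cs.length : Int) - 1) - 1).toNat = 0 := by omega
    have hr : cs.length - 1 = 0 := by omega
    rw [hf, hr]
    simp [pvLoopA]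
  · have h2 : 2 ≤ cs.length := by omega
    have hf : (((cs.length : Int) - 1) - 1).toNat = cs.length - 2 := by omega
    have he : (cs.length : Int) - 1 = (cs.length : Int) - 1 - ((0 : Nat) : Int) := by simp
    rw [hf, he, show ((0 : Int)) = ((0 : Nat) : Int) from rfl,
      pvLoopA_eq cs (cs.length - 2) 0 (by omega)]
    simp only [Nat.zero_add]
    by_cases hall : ∀ i < cs.length - 1, pvDiffAt cs i = pvDiffAt cs (cs.length - 2 - i)
    · rw [if_pos (fun j hj => hall j (by omega)), if_pos ((pvPalindrome_iff cs).mpr hall)]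
    · rw [if_neg, if_neg (fun hp => hall ((pvPalindrome_iff cs).mp hp))]
      intro hsmall
      apply hall
      intro i hi
      by_cases hlast : i < cs.length - 2
      · exact hsmall i hlast
      · have hieq : i = cs.length - 2 := by omega
        subst hieq
        have e0 : cs.length - 2 - (cs.length - 2) = 0 := by omega
        rw [e0]
        by_cases h0 : cs.length - 2 = 0
        · rw [h0]
        · have := (hsmall 0 (by omega)).symm
          simpa using this

-- ===== VERDICT (by name: the statement is the Claim_ definition above) =====
theorem is_funny_string_spec : Claim_equal_is_funny_string := by
  intro s _
  unfold Spec_is_funny_string is_funny_string is_funny_string_alt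
  exact pvMain s.toList
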